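-- pv_equiv track=rewrite | github.com/AbigailMcGovern/iterseg | src/iterseg/watershed.py | _raveled_coordinate
-- ===== SOURCE A (Python) =====
-- def _raveled_coordinate(coordinate, shape):
--     # array[z, y, x] = (
--     #     array.ravel()[
--     #         z * array.shape[1] * array.shape[2]
--     #         + y * array.shape[2]
--     #         + x
--     #     ]
--     # )
--     raveled_coord = 0
--     for i in range(len(coordinate)):
--         to_add = coordinate[i]
--         for j in range(len(shape)):
--             if j > i:
--                 to_add *= shape[j]
--         raveled_coord += to_add
--     return raveled_coord
-- ===== SOURCE B (Python) =====
-- def _raveled_coordinate(coordinate, shape):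
--     # Single backward pass maintaining the running stride (suffix product of shape).
--     stride = 1
--     for s in shape[len(coordinate):]:
--         stride *= s
--     total = 0
--     for i in range(len(coordinate) - 1, -1, -1):
--         total += coordinate[i] * stride
--         if i < len(shape):
--             stride *= shape[i]
--     return total
-- ===== Notes on version B (the rewrite author's own statement) =====
-- stated objective: faster
-- what changed: Replaces the nested loop (recomputing the suffix product of shape for every coordinate) with a single backward pass that maintains a running stride, plus one initial pass for any shape entries beyond the coordinate length.
import Mathlib
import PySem

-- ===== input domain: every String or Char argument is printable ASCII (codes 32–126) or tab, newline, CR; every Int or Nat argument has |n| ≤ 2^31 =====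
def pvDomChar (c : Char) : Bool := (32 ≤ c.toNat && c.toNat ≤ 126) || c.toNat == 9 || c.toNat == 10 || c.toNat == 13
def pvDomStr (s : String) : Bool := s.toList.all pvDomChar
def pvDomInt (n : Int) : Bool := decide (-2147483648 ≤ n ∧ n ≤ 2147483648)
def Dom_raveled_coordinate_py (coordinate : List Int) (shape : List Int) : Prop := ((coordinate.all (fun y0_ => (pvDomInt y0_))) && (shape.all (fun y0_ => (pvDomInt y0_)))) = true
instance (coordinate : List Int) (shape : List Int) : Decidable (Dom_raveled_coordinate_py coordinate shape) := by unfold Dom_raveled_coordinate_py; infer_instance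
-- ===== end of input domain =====

-- B replaces A's nested loop by a single backward pass maintaining a running stride (suffix product of shape): O(n+m) instead of O(n*m).


-- ===== PORT A =====
-- literal transliteration of A: for i in range(len(coordinate)): inner loop over range(len(shape)) multiplying shape[j] when j > i
def raveled_coordinate_py (coordinate : List Int) (shape : List Int) : Int :=
  (List.range coordinate.length).foldl
    (fun raveled_coord i =>
      let to_add := (List.range shape.length).foldl
        (fun to_add j => if j > i then to_add * shape.getD j 0 else to_add)
        (coordinate.getD i 0)
      raveled_coord + to_add)
    0

-- ===== PORT B =====
-- transliteration of Source B: stride initialised over shape[len(coordinate):], then the backward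
-- loop for i in range(len(coordinate)-1, -1, -1) carrying the state (total, stride)
def raveled_coordinate_py_alt (coordinate : List Int) (shape : List Int) : Int :=
  let stride0 := (shape.drop coordinate.length).foldl (· * ·) 1
  let p := (List.range coordinate.length).reverse.foldl
    (fun (st : Int × Int) i =>
      let total := st.1 + coordinate.getD i 0 * st.2
      let stride := if i < shape.length then st.2 * shape.getD i 0 else st.2
      (total, stride))
    (0, stride0)
  p.1

-- ===== PRECONDITION & SPEC =====
def Spec_raveled_coordinate_py (coordinate : List Int) (shape : List Int) (out : Int) : Prop := out = raveled_coordinate_py_alt coordinate shape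
instance (coordinate : List Int) (shape : List Int) (out : Int) : Decidable (Spec_raveled_coordinate_py coordinate shape out) := by unfold Spec_raveled_coordinate_py; infer_instance

-- ===== CLAIM (what is proved, stated in full; the proofs are below) =====
def Claim_equal_raveled_coordinate_py : Prop := ∀ (coordinate : List Int) (shape : List Int), Dom_raveled_coordinate_py coordinate shape → Spec_raveled_coordinate_py coordinate shape (raveled_coordinate_py coordinate shape)

-- ===== LEMMAS AND PROOFS =====

-- foldl with (*) equals the seed times the product
theorem pv_foldl_mul (l : List Int) (a : Int) : l.foldl (· * ·) a = a * l.prod := by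
  induction l generalizing a with
  | nil => simp
  | cons x xs ih => simp only [List.foldl_cons, List.prod_cons, ih]; ring

-- inner loop of A with the condition always true: multiplies everything
theorem pv_inner_all (sh : List Int) (c : Int) :
    (List.range sh.length).foldl (fun t j => t * sh.getD j 0) c = c * sh.prod := by
  induction sh generalizing c with
  | nil => simp
  | cons s ss ih =>
    simp only [List.length_cons, List.range_succ_eq_map, List.foldl_cons, List.foldl_map,
      List.getD_cons_zero, List.getD_cons_succ, List.prod_cons]
    rw [ih]
    ring

-- A's inner loop computes: start value times the product of shape[i+1:]
theorem pv_inner (sh : List Int) (i : Nat) (c : Int) :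
    (List.range sh.length).foldl (fun t j => if j > i then t * sh.getD j 0 else t) c
      = c * (sh.drop (i + 1)).prod := by
  induction sh generalizing i c with
  | nil => simp
  | cons s ss ih =>
    simp only [List.length_cons, List.range_succ_eq_map, List.foldl_cons, List.foldl_map,
      List.getD_cons_zero, List.getD_cons_succ]
    have h0 : ¬ (0 > i) := by omega
    rw [if_neg h0]
    cases i with
    | zero =>
      have he : (fun (t : Int) (j : Nat) => if j + 1 > 0 then t * ss.getD j 0 else t)
          = fun t j => t * ss.getD j 0 := by funext t j; simp
      rw [he, pv_inner_all]
      simp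
    | succ k =>
      have he : (fun (t : Int) (j : Nat) => if j + 1 > k + 1 then t * ss.getD j 0 else t)
          = fun t j => if j > k then t * ss.getD j 0 else t := by
        funext t j
        by_cases h : j > k <;> simp [h]
      rw [he, ih]
      simp

-- summing loop over range: foldl accumulation equals a Finset sum
theorem pv_foldl_sum (g : Nat → Int) (m : Nat) (acc : Int) :
    (List.range m).foldl (fun rc i => rc + g i) acc = acc + ∑ i ∈ Finset.range m, g i := by
  induction m generalizing acc with
  | zero => simp
  | succ n ih =>
    rw [List.range_succ, List.foldl_append, ih, Finset.sum_range_succ]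
    simp only [List.foldl_cons, List.foldl_nil]
    ring

-- stride update step of B: one dimension folded into the suffix product
theorem pv_stride_step (sh : List Int) (m : Nat) :
    (if m < sh.length then (sh.drop (m + 1)).prod * sh.getD m 0 else (sh.drop (m + 1)).prod)
      = (sh.drop m).prod := by
  by_cases h : m < sh.length
  · rw [if_pos h, List.getD_eq_getElem _ _ h]
    conv_rhs => rw [List.drop_eq_getElem_cons h, List.prod_cons]
    ring
  · rw [if_neg h]
    have h1 : sh.drop m = [] := List.drop_eq_nil_of_le (by omega)
    have h2 : sh.drop (m + 1) = [] := List.drop_eq_nil_of_le (by omega)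
    rw [h1, h2]

-- B's backward loop invariant: starting with stride = prod(shape[m:]), processing indices
-- m-1 … 0 adds the first m terms and leaves stride = prod(shape)
theorem pv_back_loop (coordinate sh : List Int) (m : Nat) (t : Int) :
    (List.range m).reverse.foldl
      (fun (st : Int × Int) i =>
        let total := st.1 + coordinate.getD i 0 * st.2
        let stride := if i < sh.length then st.2 * sh.getD i 0 else st.2
        (total, stride))
      (t, (sh.drop m).prod)
    = (t + ∑ i ∈ Finset.range m, coordinate.getD i 0 * (sh.drop (i + 1)).prod, sh.prod) := by
  induction m generalizing t with
  | zero => simp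
  | succ n ih =>
    rw [List.range_succ, List.reverse_append]
    simp only [List.reverse_cons, List.reverse_nil, List.nil_append, List.singleton_append,
      List.foldl_cons]
    rw [pv_stride_step sh n, ih, Finset.sum_range_succ]
    simp only [Prod.mk.injEq]
    exact ⟨by ring, trivial⟩

-- ===== VERDICT (by name: the statement is the Claim_ definition above) =====
theorem raveled_coordinate_py_spec : Claim_equal_raveled_coordinate_py := by
  intro coordinate shape _
  unfold Spec_raveled_coordinate_py raveled_coordinate_py raveled_coordinate_py_alt
  have hA : (fun (raveled_coord : Int) (i : Nat) =>
      raveled_coord + (List.range shape.length).foldl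
        (fun to_add j => if j > i then to_add * shape.getD j 0 else to_add)
        (coordinate.getD i 0))
      = fun rc i => rc + coordinate.getD i 0 * (shape.drop (i + 1)).prod := by
    funext rc i
    rw [pv_inner]
  rw [hA, pv_foldl_sum]
  simp only [pv_foldl_mul, one_mul, pv_back_loop]
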